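-- pv_equiv track=rewrite | github.com/Meinersbur/isl | interface/tool/support.py | join_natural
-- ===== SOURCE A (Python) =====
-- def join_natural(l, separator=', ', lastseparator = ' and '):
--   l = list(l)
--   n = len(l)
--   result = ''
--   for i,v in enumerate(l):
--     if i == 0:
--       result = str(v)
--     elif i == n-1:
--       result += str(lastseparator) + str(v)
--     else:
--       result +=  str(separator) + str(v)
--   return result
-- ===== SOURCE B (Python) =====
-- def join_natural(l, separator=', ', lastseparator=' and '):
--   l = [str(v) for v in l]
--   if not l:
--     return ''
--   if len(l) == 1:
--     return l[0]
--   return str(separator).join(l[:-1]) + str(lastseparator) + l[-1]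
-- ===== Notes on version B (the rewrite author's own statement) =====
-- stated objective: simpler
-- what changed: Replaces the index-tracking enumerate loop with first/last/middle branches by a slice-based decomposition: str.join over all-but-last plus the lastseparator and the final element.
import Mathlib
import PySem

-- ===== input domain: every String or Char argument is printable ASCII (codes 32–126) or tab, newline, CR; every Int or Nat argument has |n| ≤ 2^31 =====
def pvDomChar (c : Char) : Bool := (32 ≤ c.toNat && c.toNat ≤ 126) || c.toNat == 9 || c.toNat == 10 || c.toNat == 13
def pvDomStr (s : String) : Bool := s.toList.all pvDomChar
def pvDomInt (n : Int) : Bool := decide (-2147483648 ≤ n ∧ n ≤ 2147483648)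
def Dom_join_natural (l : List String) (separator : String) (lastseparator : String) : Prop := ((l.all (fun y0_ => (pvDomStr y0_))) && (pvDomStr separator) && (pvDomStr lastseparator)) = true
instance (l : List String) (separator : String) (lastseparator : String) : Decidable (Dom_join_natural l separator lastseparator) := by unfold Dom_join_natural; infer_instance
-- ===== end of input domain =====

-- B replaces A's enumerate loop with index branches by a slice-based decomposition (join all-but-last, then append lastseparator + last); same cost, simpler.

-- ===== PORT A =====
def join_natural (l : List String) (separator : String) (lastseparator : String) : String :=
  let n : Int := l.length
  (PySem.List.enumerate l).foldl
    (fun result iv =>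
      if iv.1 == 0 then iv.2
      else if iv.1 == n - 1 then result ++ lastseparator ++ iv.2
      else result ++ separator ++ iv.2) ""

-- ===== PORT B =====
def join_natural_alt (l : List String) (separator : String) (lastseparator : String) : String :=
  match l with
  | [] => ""
  | [x] => x
  | _ => PySem.Str.join separator (PySem.List.slice l none (some (-1))) ++ lastseparator ++ l.getLast!

-- ===== PRECONDITION & SPEC =====
def Spec_join_natural (l : List String) (separator : String) (lastseparator : String) (out : String) : Prop := out = join_natural_alt l separator lastseparator
instance (l : List String) (separator : String) (lastseparator : String) (out : String) : Decidable (Spec_join_natural l separator lastseparator out) := by unfold Spec_join_natural; infer_instance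

-- ===== CLAIM (what is proved, stated in full; the proofs are below) =====
def Claim_equal_join_natural : Prop := ∀ (l : List String) (separator : String) (lastseparator : String), Dom_join_natural l separator lastseparator → Spec_join_natural l separator lastseparator (join_natural l separator lastseparator)

-- ===== LEMMAS AND PROOFS =====

-- "sep ++ w" for every element of the list, concatenated
def midJoin (sep : String) : List String → String
  | [] => ""
  | w :: ws => sep ++ w ++ midJoin sep ws

theorem strJoin_cons (sep x : String) (ms : List String) :
    PySem.Str.join sep (x :: ms) = x ++ midJoin sep ms := by
  induction ms generalizing x with
  | nil => simp [PySem.Str.join, PySem.Chars.join_singleton, midJoin]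
  | cons w ws ih =>
      rw [show (x :: w :: ws) = ([x] ++ (w :: ws)) from rfl]
      simp only [List.singleton_append]
      calc PySem.Str.join sep (x :: w :: ws)
          = x ++ sep ++ PySem.Str.join sep (w :: ws) := by
            simp [PySem.Str.join, PySem.Chars.join_cons_cons, String.append_assoc]
        _ = x ++ midJoin sep (w :: ws) := by rw [ih]; simp [midJoin, String.append_assoc]

-- A's fold over the tail (indices k ≥ 1, last index n - 1) closed form
theorem foldA_tail (sep lastsep : String) (n : Int) :
    ∀ (m : List String) (v : String) (k : Int) (acc : String),
      1 ≤ k → k + (m.length + 1) = n →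
      ((PySem.List.enumerate (v :: m) k).foldl
        (fun result iv =>
          if iv.1 == 0 then iv.2
          else if iv.1 == n - 1 then result ++ lastsep ++ iv.2
          else result ++ sep ++ iv.2) acc)
        = acc ++ midJoin sep ((v :: m).dropLast) ++ lastsep ++ (v :: m).getLast! := by
  intro m
  induction m with
  | nil =>
      intro v k acc hk hn
      simp only [List.length_nil, Nat.cast_zero, zero_add] at hn
      have h0 : ¬ (k = (0 : Int)) := by omega
      have h1 : k = n - 1 := by omega
      simp only [PySem.List.enumerate_cons, PySem.List.enumerate_nil, List.foldl_cons,
        List.foldl_nil, beq_iff_eq, if_neg h0, if_pos h1]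
      simp [midJoin, List.getLast!, String.append_assoc]
  | cons w ws ih =>
      intro v k acc hk hn
      have h0 : (k == (0 : Int)) = false := by simp; omega
      have h1 : (k == n - 1) = false := by
        simp only [List.length_cons] at hn; simp; push_cast at hn ⊢; omega
      rw [PySem.List.enumerate_cons]
      simp only [List.foldl_cons, h0, h1, Bool.false_eq_true, if_false]
      rw [ih w (k + 1) (acc ++ sep ++ v) (by omega)
        (by simp only [List.length_cons] at hn ⊢; push_cast at hn ⊢; omega)]
      have hlast : (v :: w :: ws).getLast! = (w :: ws).getLast! := by
        simp [List.getLast!, List.getLast]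
      rw [hlast]
      simp [List.dropLast, midJoin, String.append_assoc]

theorem slice_neg_one (l : List String) :
    PySem.List.slice l none (some (-1)) = l.dropLast := by
  simp only [PySem.List.slice, Int.reduceNeg, Order.lt_one_iff, PySem.List.clampIdx_neg_ofNat,
    tsub_zero, List.drop_zero]
  rw [List.dropLast_eq_take]

-- ===== VERDICT (by name: the statement is the Claim_ definition above) =====
theorem join_natural_spec : Claim_equal_join_natural := by
  intro l sep lastsep _
  unfold Spec_join_natural join_natural join_natural_alt
  match l with
  | [] => simp [PySem.List.enumerate_nil]
  | [x] => simp [PySem.List.enumerate_cons, PySem.List.enumerate_nil]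
  | x :: v :: m =>
      rw [PySem.List.enumerate_cons]
      simp only [List.foldl_cons, beq_self_eq_true, if_true, zero_add]
      rw [foldA_tail sep lastsep (x :: v :: m).length (m := m) (v := v) (k := 1) (acc := x)
        (by omega) (by simp; ring)]
      rw [slice_neg_one, show (x :: v :: m).dropLast = x :: (v :: m).dropLast from rfl,
        strJoin_cons]
      have : (x :: v :: m).getLast! = (v :: m).getLast! := by simp [List.getLast!, List.getLast]
      rw [this]
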